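-- pv_equiv track=rewrite | github.com/yewinston/p2py | src/client.py | fileStrip
-- ===== SOURCE A (Python) =====
-- def fileStrip(filename) -> str:
--     """
--     Strips the filename from directory path and escape characters
--     """
--     size = len(filename)
--     stripped = ""
--     for idx in range(size-1, -1, -1):
--         if filename[idx] == "/" or filename[idx] == "\'":
--             break
--         else:
--             stripped+=filename[idx]
--
--     # this reverses the string
--     return stripped[::-1]
-- ===== SOURCE B (Python) =====
-- def fileStrip(filename) -> str:
--     """
--     Strips the filename from directory path and escape characters
--     """
--     last = -1
--     for idx in range(len(filename)):
--         if filename[idx] == "/" or filename[idx] == "'":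
--             last = idx
--     return filename[last+1:]
-- ===== Notes on version B (the rewrite author's own statement) =====
-- stated objective: alternative
-- what changed: Forward single pass that keeps the index of the last separator and slices once at the end, instead of walking backwards accumulating characters one by one and reversing the accumulated string.
import Mathlib
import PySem

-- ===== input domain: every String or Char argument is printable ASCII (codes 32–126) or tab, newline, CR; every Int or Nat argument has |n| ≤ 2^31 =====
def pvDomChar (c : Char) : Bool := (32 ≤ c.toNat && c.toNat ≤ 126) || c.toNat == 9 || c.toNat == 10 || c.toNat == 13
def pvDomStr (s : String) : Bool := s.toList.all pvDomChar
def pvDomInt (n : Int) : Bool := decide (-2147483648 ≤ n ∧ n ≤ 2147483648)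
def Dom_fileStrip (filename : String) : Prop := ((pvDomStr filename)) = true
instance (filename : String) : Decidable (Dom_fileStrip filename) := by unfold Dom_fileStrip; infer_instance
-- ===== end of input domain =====

-- B replaces A's backward scan-and-reverse with a forward pass keeping the last separator index and one final slice (alternative decomposition, same cost).


-- ===== PORT A =====
-- the backward for-loop with break; indices produced by range(size-1,-1,-1) are always
-- in range, so filename[idx] is ported with pyGetD (the default is never read)
def fileStripLoopA (cs : List Char) : List Int → List Char → List Char
  | [], stripped => stripped
  | idx :: rest, stripped =>
    if PySem.List.pyGetD cs idx ' ' == '/' || PySem.List.pyGetD cs idx ' ' == '\'' then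
      stripped                                   -- break
    else
      fileStripLoopA cs rest (stripped ++ [PySem.List.pyGetD cs idx ' '])

def fileStrip (filename : String) : String :=
  let cs := filename.toList
  let size : Int := cs.length
  let stripped := fileStripLoopA cs (PySem.List.pyRange (size - 1) (-1) (-1)) []
  String.mk stripped.reverse                     -- stripped[::-1]

-- ===== PORT B =====
def fileStrip_alt (filename : String) : String :=
  let cs := filename.toList
  let last : Int := (PySem.List.pyRange 0 cs.length 1).foldl
    (fun last idx =>
      if PySem.List.pyGetD cs idx ' ' == '/' || PySem.List.pyGetD cs idx ' ' == '\'' then idx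
      else last) (-1)
  String.mk (PySem.List.slice cs (some (last + 1)) none)   -- filename[last+1:]

-- ===== PRECONDITION & SPEC =====
def Spec_fileStrip (filename : String) (out : String) : Prop := out = fileStrip_alt filename
instance (filename : String) (out : String) : Decidable (Spec_fileStrip filename out) := by unfold Spec_fileStrip; infer_instance

-- ===== CLAIM (what is proved, stated in full; the proofs are below) =====
def Claim_equal_fileStrip : Prop := ∀ (filename : String), Dom_fileStrip filename → Spec_fileStrip filename (fileStrip filename)

-- ===== LEMMAS AND PROOFS =====

-- both sides compute the suffix of cs after its last '/' or '\''
def pvSuffix (cs : List Char) : List Char :=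
  (cs.reverse.takeWhile (fun c => !(c == '/' || c == '\''))).reverse

lemma pvGetD_append (ys : List Char) (c : Char) (i : Int) (h0 : 0 ≤ i)
    (h1 : i < (ys.length : Int)) (d : Char) :
    PySem.List.pyGetD (ys ++ [c]) i d = PySem.List.pyGetD ys i d := by
  lift i to Nat using h0
  simp only [PySem.List.pyGetD_natCast]
  rw [List.getD, List.getD, List.getElem?_append_left (by exact_mod_cast h1)]

lemma pvIdx_eq (n : Nat) :
    PySem.List.pyRange ((n : Int) - 1) (-1) (-1) = (List.range n).reverse.map Int.ofNat := by
  simp only [PySem.List.pyRange]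
  rw [if_neg (by norm_num), if_neg (by norm_num)]
  split_ifs with h
  · have hc : (((n : Int) - 1 - (-1) + - (-1) - 1) / - (-1)).toNat = n := by norm_num
    rw [hc]
    apply List.ext_getElem (by simp)
    intro i h1 h2
    simp only [List.getElem_map, List.getElem_reverse, List.getElem_range]
    simp only [List.length_map, List.length_range] at h1
    simp [Int.ofNat_eq_natCast]
    omega
  · have : n = 0 := by omega
    subst this; simp

lemma pvLoopA_congr (ys : List Char) (c : Char) (idxs : List Int)
    (h : ∀ i ∈ idxs, 0 ≤ i ∧ i < (ys.length : Int)) (acc : List Char) :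
    fileStripLoopA (ys ++ [c]) idxs acc = fileStripLoopA ys idxs acc := by
  induction idxs generalizing acc with
  | nil => rfl
  | cons i rest ih =>
    obtain ⟨hi0, hi1⟩ := h i (List.mem_cons_self)
    rw [fileStripLoopA, fileStripLoopA, pvGetD_append ys c i hi0 hi1]
    split
    · rfl
    · exact ih (fun j hj => h j (List.mem_cons_of_mem _ hj)) _

lemma pvLoopA_spec (cs : List Char) (acc : List Char) :
    fileStripLoopA cs ((List.range cs.length).reverse.map Int.ofNat) acc
      = acc ++ (cs.reverse.takeWhile (fun c => !(c == '/' || c == '\''))) := by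
  induction cs using List.reverseRecOn generalizing acc with
  | nil => simp [fileStripLoopA]
  | append_singleton ys c ih =>
    have hlen : (ys ++ [c]).length = ys.length + 1 := by simp
    rw [hlen, List.range_succ]
    simp only [List.reverse_append, List.reverse_cons, List.reverse_nil, List.nil_append,
      List.cons_append, List.map_cons]
    rw [fileStripLoopA]
    have hget : PySem.List.pyGetD (ys ++ [c]) (Int.ofNat ys.length) ' ' = c := by
      simp only [Int.ofNat_eq_natCast, PySem.List.pyGetD_natCast]
      simp [List.getD]
    rw [hget]
    by_cases hc : (c == '/' || c == '\'') = true
    · rw [if_pos hc]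
      simp only [Bool.or_eq_true, beq_iff_eq] at hc
      rcases hc with hc | hc <;> subst hc <;> simp
    · rw [if_neg hc]
      rw [pvLoopA_congr ys c _ (by
        intro i hi
        simp only [List.mem_map, List.mem_reverse, List.mem_range] at hi
        obtain ⟨k, hk, rfl⟩ := hi
        refine ⟨by simp, ?_⟩
        simp only [Int.ofNat_eq_natCast]
        exact_mod_cast hk)]
      rw [ih]
      simp only [Bool.or_eq_true, beq_iff_eq, not_or] at hc
      simp [hc.1, hc.2]

def pvLast (cs : List Char) : Int :=
  (PySem.List.pyRange 0 cs.length 1).foldl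
    (fun last idx =>
      if PySem.List.pyGetD cs idx ' ' == '/' || PySem.List.pyGetD cs idx ' ' == '\'' then idx
      else last) (-1)

lemma pvLoopB_spec (cs : List Char) :
    0 ≤ pvLast cs + 1 ∧ (pvLast cs + 1).toNat ≤ cs.length
      ∧ cs.drop (pvLast cs + 1).toNat = pvSuffix cs := by
  induction cs using List.reverseRecOn with
  | nil => simp [pvLast, pvSuffix, PySem.List.pyRange]
  | append_singleton ys c ih =>
    obtain ⟨ih0, ih1, ih2⟩ := ih
    have hget : PySem.List.pyGetD (ys ++ [c]) ((ys.length : Int)) ' ' = c := by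
      simp only [PySem.List.pyGetD_natCast]
      simp [List.getD]
    have hl : pvLast (ys ++ [c])
        = if (c == '/' || c == '\'') = true then ((ys.length : Int)) else pvLast ys := by
      unfold pvLast
      have hlen : ((ys ++ [c]).length : Int) = (ys.length : Int) + 1 := by simp
      have hfold : List.foldl
          (fun last idx =>
            if PySem.List.pyGetD (ys ++ [c]) idx ' ' == '/' || PySem.List.pyGetD (ys ++ [c]) idx ' ' == '\'' then idx
            else last) (-1) (PySem.List.pyRange 0 (ys.length : Int) 1) = pvLast ys := by
        apply PySem.List.foldl_congr_mem
        intro a x hx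
        rw [PySem.List.mem_pyRange_one] at hx
        rw [pvGetD_append ys c x hx.1 hx.2]
      rw [hlen, PySem.List.pyRange_one_succ_right (by positivity), List.foldl_append, hfold]
      simp only [List.foldl_cons, List.foldl_nil, hget]
      split <;> rfl
    by_cases hc : (c == '/' || c == '\'') = true
    · rw [hl, if_pos hc]
      have htn : ((ys.length : Int) + 1).toNat = (ys ++ [c]).length := by simp
      refine ⟨by positivity, by rw [htn], ?_⟩
      rw [htn, List.drop_length]
      simp only [Bool.or_eq_true, beq_iff_eq] at hc
      rcases hc with hc | hc <;> subst hc <;> simp [pvSuffix]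
    · rw [hl, if_neg hc]
      refine ⟨ih0, ?_, ?_⟩
      · simp only [List.length_append, List.length_cons, List.length_nil]
        omega
      · rw [List.drop_append_of_le_length ih1, ih2]
        simp only [Bool.or_eq_true, beq_iff_eq, not_or] at hc
        simp [pvSuffix, hc.1, hc.2]

-- ===== VERDICT (by name: the statement is the Claim_ definition above) =====
theorem fileStrip_spec : Claim_equal_fileStrip := by
  intro filename _
  unfold Spec_fileStrip fileStrip fileStrip_alt
  dsimp only
  have hB := pvLoopB_spec filename.toList
  unfold pvLast at hB
  obtain ⟨h0, h1, h2⟩ := hB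
  rw [pvIdx_eq, pvLoopA_spec, PySem.List.slice_from _ h0, h2]
  simp [pvSuffix]
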